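-- pv_equiv track=rewrite | github.com/Lezas/advent-of-code | python/Challenges/2023/Day3/puzzle.py | neighbour_has_symbol_first_part
-- ===== SOURCE A (Python) =====
-- def neighbour_has_symbol_first_part(grid, curr_row, curr_column):
--     neighbours_coordinates = [
--         [-1, 1],
--         [-1, 0],
--         [-1, -1],
--         [1, 1],
--         [1, 0],
--         [1, -1],
--         [0, 1],
--         [0, -1],
--         [0, 0],
--     ]
--
--     asserted_chars = ''
--     for neighbour_coordinates in neighbours_coordinates:
--         assert_row_no = curr_row + neighbour_coordinates[0]
--         assert_column_no = curr_column + neighbour_coordinates[1]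
--         if (assert_row_no < 0
--                 or assert_column_no < 0
--                 or assert_row_no > len(grid) -1
--                 or assert_column_no > len(grid[assert_row_no]) - 1
--         ):
--             continue
--         assert_char = grid[assert_row_no][assert_column_no]
--
--         asserted_chars += assert_char
--         if assert_char == '.' or assert_char.isdigit():
--             continue
--         else:
--             return True
--
--     return False
-- ===== SOURCE B (Python) =====
-- def neighbour_has_symbol_first_part(grid, curr_row, curr_column):
--     # Scan the whole grid once and test whether any symbol cell lies within
--     # Chebyshev distance 1 of (curr_row, curr_column).
--     return any(
--         ch != '.' and not ch.isdigit()
--         for i, row in enumerate(grid)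
--         for j, ch in enumerate(row)
--         if abs(i - curr_row) <= 1 and abs(j - curr_column) <= 1
--     )
-- ===== Notes on version B (the rewrite author's own statement) =====
-- stated objective: alternative
-- what changed: Instead of indexing the nine candidate cells with explicit bounds guards, B scans the entire grid with enumerate and reports whether any symbol cell (char != '.' and not a digit) lies within Chebyshev distance 1 of (curr_row, curr_column); bounds checks disappear because the scan only visits existing cells.
import Mathlib
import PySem

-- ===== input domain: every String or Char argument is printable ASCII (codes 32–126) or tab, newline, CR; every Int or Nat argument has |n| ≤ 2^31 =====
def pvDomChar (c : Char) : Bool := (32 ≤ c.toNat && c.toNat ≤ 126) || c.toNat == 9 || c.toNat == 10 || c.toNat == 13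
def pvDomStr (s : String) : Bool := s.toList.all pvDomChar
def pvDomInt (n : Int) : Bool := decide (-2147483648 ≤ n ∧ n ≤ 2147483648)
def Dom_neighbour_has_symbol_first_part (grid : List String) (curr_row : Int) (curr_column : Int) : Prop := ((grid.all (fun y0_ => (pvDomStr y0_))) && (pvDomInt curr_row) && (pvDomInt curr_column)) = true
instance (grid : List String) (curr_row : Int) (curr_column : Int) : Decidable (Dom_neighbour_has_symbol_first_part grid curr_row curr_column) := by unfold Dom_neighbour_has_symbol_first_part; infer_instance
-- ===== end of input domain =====

-- B replaces A's nine-offset probe with explicit bounds guards by a whole-grid enumerate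
-- scan testing whether any symbol cell lies within Chebyshev distance 1 of the cell: alternative.

-- ===== PORT A =====
-- grid[assert_row_no]; the loop's bounds guard proves the index in range, so pyGetD is exact
def pvRowA (grid : List String) (i : Int) : String := PySem.List.pyGetD grid i ""

def nhs_loop (grid : List String) (curr_row : Int) (curr_column : Int)
    (offs : List (Int × Int)) (asserted_chars : List Char) : Bool :=
  match offs with
  | [] => false
  | d :: rest =>
    let assert_row_no := curr_row + d.1
    let assert_column_no := curr_column + d.2
    if assert_row_no < 0 ∨ assert_column_no < 0
        ∨ assert_row_no > (grid.length : Int) - 1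
        ∨ assert_column_no > PySem.Str.len (pvRowA grid assert_row_no) - 1 then
      nhs_loop grid curr_row curr_column rest asserted_chars
    else
      -- in range by the guard, so pyGetD is exact here
      let assert_char := PySem.List.pyGetD (pvRowA grid assert_row_no).toList assert_column_no ' '
      if assert_char == '.' || assert_char.isDigit then
        nhs_loop grid curr_row curr_column rest (asserted_chars ++ [assert_char])
      else
        true

def neighbour_has_symbol_first_part (grid : List String) (curr_row : Int) (curr_column : Int) : Bool :=
  nhs_loop grid curr_row curr_column
    [(-1, 1), (-1, 0), (-1, -1), (1, 1), (1, 0), (1, -1), (0, 1), (0, -1), (0, 0)] []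

-- ===== PORT B =====
-- whole-grid scan: any symbol char within Chebyshev distance 1 of (curr_row, curr_column)
def neighbour_has_symbol_first_part_alt (grid : List String) (curr_row : Int) (curr_column : Int) : Bool :=
  (PySem.List.enumerate grid 0).any (fun p =>
    (PySem.List.enumerate p.2.toList 0).any (fun q =>
      decide ((p.1 - curr_row).natAbs ≤ 1) && decide ((q.1 - curr_column).natAbs ≤ 1)
        && (q.2 != '.') && !q.2.isDigit))

-- ===== PRECONDITION & SPEC =====
def Spec_neighbour_has_symbol_first_part (grid : List String) (curr_row : Int) (curr_column : Int) (out : Bool) : Prop := out = neighbour_has_symbol_first_part_alt grid curr_row curr_column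
instance (grid : List String) (curr_row : Int) (curr_column : Int) (out : Bool) : Decidable (Spec_neighbour_has_symbol_first_part grid curr_row curr_column out) := by unfold Spec_neighbour_has_symbol_first_part; infer_instance

-- ===== CLAIM (what is proved, stated in full; the proofs are below) =====
def Claim_equal_neighbour_has_symbol_first_part : Prop := ∀ (grid : List String) (curr_row : Int) (curr_column : Int), Dom_neighbour_has_symbol_first_part grid curr_row curr_column → Spec_neighbour_has_symbol_first_part grid curr_row curr_column (neighbour_has_symbol_first_part grid curr_row curr_column)

-- ===== LEMMAS AND PROOFS =====

-- "cell (i, j) is in bounds and holds a symbol" — the common reference predicate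
def pvHit (grid : List String) (i j : Int) : Prop :=
  0 ≤ i ∧ i < (grid.length : Int) ∧ 0 ≤ j ∧ j < ((grid.getD i.toNat "").toList.length : Int) ∧
  (((grid.getD i.toNat "").toList.getD j.toNat ' ') != '.'
    && !((grid.getD i.toNat "").toList.getD j.toNat ' ').isDigit) = true

-- the loop's result does not depend on the asserted_chars accumulator
theorem nhs_loop_acc (grid : List String) (r c : Int) (offs : List (Int × Int))
    (acc acc' : List Char) : nhs_loop grid r c offs acc = nhs_loop grid r c offs acc' := by
  induction offs generalizing acc acc' with
  | nil => rfl
  | cons d rest ih =>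
    simp only [nhs_loop]
    split
    · exact ih acc acc'
    · split
      · exact ih _ _
      · rfl

theorem nhs_loop_cons (grid : List String) (r c dr dc : Int)
    (rest : List (Int × Int)) (acc : List Char) :
    (nhs_loop grid r c ((dr, dc) :: rest) acc = true ↔
      pvHit grid (r + dr) (c + dc) ∨ nhs_loop grid r c rest acc = true) := by
  simp only [nhs_loop]
  split
  · rename_i hguard
    constructor
    · exact Or.inr
    · rintro (hh | hh)
      · exfalso
        obtain ⟨h1, h2, h3, h4, _⟩ := hh
        rw [pvRowA, PySem.Str.len_eq, PySem.List.pyGetD_eq_getElem _ _ h1 h2,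
          ← List.getD_eq_getElem grid "" (by omega)] at hguard
        omega
      · exact hh
  · rename_i hguard
    push Not at hguard
    obtain ⟨h1, h2, h3, h4⟩ := hguard
    rw [pvRowA, PySem.Str.len_eq, PySem.List.pyGetD_eq_getElem _ _ h1 (by omega),
      ← List.getD_eq_getElem grid "" (by omega)] at h4
    have hch : PySem.List.pyGetD (pvRowA grid (r + dr)).toList (c + dc) ' '
        = (grid.getD (r + dr).toNat "").toList.getD (c + dc).toNat ' ' := by
      rw [pvRowA, PySem.List.pyGetD_eq_getElem _ _ h1 (by omega),
        ← List.getD_eq_getElem grid "" (by omega),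
        PySem.List.pyGetD_eq_getElem _ _ h2 (by omega),
        ← List.getD_eq_getElem _ ' ' (by omega)]
    split
    · rename_i hskip
      rw [hch] at hskip
      rw [nhs_loop_acc grid r c rest (acc ++ [_]) acc]
      constructor
      · exact Or.inr
      · rintro (hh | hh)
        · exfalso
          obtain ⟨_, _, _, _, h5⟩ := hh
          simp only [beq_iff_eq, Bool.or_eq_true, bne, Bool.and_eq_true, Bool.not_eq_true',
            beq_eq_false_iff_ne] at hskip h5
          rcases hskip with h | h
          · exact h5.1 h
          · rw [h5.2] at h; exact Bool.false_ne_true h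
        · exact hh
    · rename_i hskip
      rw [hch] at hskip
      simp only [true_iff]
      refine Or.inl ⟨h1, by omega, h2, by omega, ?_⟩
      simp only [beq_iff_eq, Bool.or_eq_true, not_or, Bool.not_eq_true] at hskip
      simp only [bne, Bool.and_eq_true, Bool.not_eq_true', beq_eq_false_iff_ne]
      exact ⟨hskip.1, hskip.2⟩

-- A returns true exactly when one of the nine window cells is an in-bounds symbol cell
theorem A_iff (grid : List String) (r c : Int) :
    neighbour_has_symbol_first_part grid r c = true ↔
      pvHit grid (r + -1) (c + 1) ∨ pvHit grid (r + -1) (c + 0) ∨ pvHit grid (r + -1) (c + -1) ∨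
      pvHit grid (r + 1) (c + 1) ∨ pvHit grid (r + 1) (c + 0) ∨ pvHit grid (r + 1) (c + -1) ∨
      pvHit grid (r + 0) (c + 1) ∨ pvHit grid (r + 0) (c + -1) ∨ pvHit grid (r + 0) (c + 0) := by
  unfold neighbour_has_symbol_first_part
  rw [show ((-1 : Int), (1 : Int)) = (-1, 1) from rfl]
  rw [nhs_loop_cons, nhs_loop_cons, nhs_loop_cons, nhs_loop_cons, nhs_loop_cons,
    nhs_loop_cons, nhs_loop_cons, nhs_loop_cons, nhs_loop_cons]
  simp only [nhs_loop]
  norm_num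

-- B returns true exactly when some cell within Chebyshev distance 1 is an in-bounds symbol cell
theorem B_iff (grid : List String) (r c : Int) :
    neighbour_has_symbol_first_part_alt grid r c = true ↔
      ∃ i j : Int, (i - r).natAbs ≤ 1 ∧ (j - c).natAbs ≤ 1 ∧ pvHit grid i j := by
  unfold neighbour_has_symbol_first_part_alt
  simp only [List.any_eq_true, PySem.List.mem_enumerate_iff]
  constructor
  · rintro ⟨p, ⟨k, hk, rfl⟩, q, ⟨m, hm, rfl⟩, hf⟩
    simp only [zero_add, Bool.and_eq_true, decide_eq_true_eq] at hf
    obtain ⟨⟨⟨hik, hjm⟩, hne⟩, hnd⟩ := hf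
    refine ⟨(k : Int), (m : Int), hik, hjm, Int.natCast_nonneg k, by exact_mod_cast hk, Int.natCast_nonneg m, ?_, ?_⟩
    · rw [Int.toNat_natCast, List.getD_eq_getElem grid "" hk]
      exact_mod_cast hm
    · rw [Int.toNat_natCast, Int.toNat_natCast, List.getD_eq_getElem grid "" hk,
        List.getD_eq_getElem _ ' ' hm]
      simp [hne, hnd]
  · rintro ⟨i, j, hik, hjm, h0, hlen, j0, jlen, jf⟩
    have hk : i.toNat < grid.length := by omega
    have hm : j.toNat < (grid[i.toNat]).toList.length := by
      rw [← List.getD_eq_getElem grid "" hk]; omega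
    refine ⟨(0 + (i.toNat : Int), grid[i.toNat]), ⟨i.toNat, hk, rfl⟩,
      (0 + (j.toNat : Int), grid[i.toNat].toList[j.toNat]), ⟨j.toNat, hm, rfl⟩, ?_⟩
    have jf' : (grid[i.toNat].toList[j.toNat] != '.'
        && !grid[i.toNat].toList[j.toNat].isDigit) = true := by
      rw [List.getD_eq_getElem grid "" hk, List.getD_eq_getElem _ ' ' hm] at jf
      exact jf
    simp only [zero_add, Bool.and_eq_true, decide_eq_true_eq] at jf' ⊢
    exact ⟨⟨⟨by omega, by omega⟩, jf'.1⟩, jf'.2⟩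

-- ===== VERDICT (by name: the statement is the Claim_ definition above) =====
theorem neighbour_has_symbol_first_part_spec : Claim_equal_neighbour_has_symbol_first_part := by
  intro grid r c _
  unfold Spec_neighbour_has_symbol_first_part
  rw [Bool.eq_iff_iff, A_iff, B_iff]
  constructor
  · rintro (h | h | h | h | h | h | h | h | h)
    exacts [⟨r + -1, c + 1, by omega, by omega, h⟩, ⟨r + -1, c + 0, by omega, by omega, h⟩,
      ⟨r + -1, c + -1, by omega, by omega, h⟩, ⟨r + 1, c + 1, by omega, by omega, h⟩,
      ⟨r + 1, c + 0, by omega, by omega, h⟩, ⟨r + 1, c + -1, by omega, by omega, h⟩,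
      ⟨r + 0, c + 1, by omega, by omega, h⟩, ⟨r + 0, c + -1, by omega, by omega, h⟩,
      ⟨r + 0, c + 0, by omega, by omega, h⟩]
  · rintro ⟨i, j, hi, hj, hh⟩
    rcases show i = r + -1 ∨ i = r + 0 ∨ i = r + 1 by omega with hi | hi | hi <;>
      rcases show j = c + -1 ∨ j = c + 0 ∨ j = c + 1 by omega with hj | hj | hj <;>
        subst hi <;> subst hj <;> tauto
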